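-- pv_equiv track=rewrite | github.com/bovellr/scaling-lamp | viewmodels/erp_database_viewmodel.py | _create_column_mapping
-- ===== SOURCE A (Python) =====
-- from typing import List, Dict, Optional, Any, Tuple
--
-- def _create_column_mapping(available_columns: List[str]) -> Dict[str, str]:
--     """Create column mapping based on available columns."""
--     mapping = {}
--     available_lower = [col.lower() for col in available_columns]
--
--     # Common column name patterns
--     patterns = {
--         'date': ['date', 'transaction_date', 'posting_date', 'value_date', 'trans_date'],
--         'description': ['description', 'narrative', 'details', 'memo'],
--         'amount': ['amount', 'value', 'transaction_amount', 'debit_amount', 'credit_amount'],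
--         'reference': ['reference', 'ref', 'transaction_ref', 'doc_number', 'cheque_ref']
--     }
--
--     for logical_name, possible_names in patterns.items():
--         for pattern in possible_names:
--             for i, col in enumerate(available_lower):
--                 if pattern in col:
--                     mapping[logical_name] = available_columns[i]
--                     break
--             if logical_name in mapping:
--                 break
--
--     return mapping
-- ===== SOURCE B (Python) =====
-- def _rank(names, low):
--     """Index of the first pattern contained in low, or None."""
--     for j, name in enumerate(names):
--         if name in low:
--             return j
--     return None
--
--
-- def _best_column(names, columns):
--     """Column minimising (pattern index, column position), or None."""
--     best = None  # (rank, column)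
--     for col in columns:
--         r = _rank(names, col.lower())
--         if r is not None and (best is None or r < best[0]):
--             best = (r, col)
--     return None if best is None else best[1]
--
--
-- def _create_column_mapping(available_columns):
--     """Create column mapping based on available columns."""
--     patterns = {
--         'date': ['date', 'transaction_date', 'posting_date', 'value_date', 'trans_date'],
--         'description': ['description', 'narrative', 'details', 'memo'],
--         'amount': ['amount', 'value', 'transaction_amount', 'debit_amount', 'credit_amount'],
--         'reference': ['reference', 'ref', 'transaction_ref', 'doc_number', 'cheque_ref']
--     }
--     mapping = {}
--     for logical_name, possible_names in patterns.items():
--         col = _best_column(possible_names, available_columns)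
--         if col is not None:
--             mapping[logical_name] = col
--     return mapping
-- ===== Notes on version B (the rewrite author's own statement) =====
-- stated objective: alternative
-- what changed: A scans patterns outer and columns inner with breaks and re-checks dict membership; B makes, per logical name, one pass over the columns keeping the argmin of (first-matching-pattern index, column position), updating only on a strictly smaller pattern index.
import Mathlib
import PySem

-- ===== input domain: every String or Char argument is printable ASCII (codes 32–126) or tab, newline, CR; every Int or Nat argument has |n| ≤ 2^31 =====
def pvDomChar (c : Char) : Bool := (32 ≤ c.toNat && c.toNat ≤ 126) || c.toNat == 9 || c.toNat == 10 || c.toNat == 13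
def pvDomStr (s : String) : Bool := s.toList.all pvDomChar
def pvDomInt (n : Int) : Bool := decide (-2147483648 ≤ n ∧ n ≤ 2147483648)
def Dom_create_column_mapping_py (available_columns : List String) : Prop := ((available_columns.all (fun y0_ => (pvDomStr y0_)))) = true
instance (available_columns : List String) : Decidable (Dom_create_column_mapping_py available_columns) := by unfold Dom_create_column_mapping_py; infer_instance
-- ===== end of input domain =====

-- B replaces A's pattern-major first-match search (two breaks plus a dict-membership re-check) by a
-- per-logical-name single pass over the columns keeping the argmin of (pattern index, column position);
-- same cost class, different traversal ("alternative").

-- the fixed pattern table shared by both Pythons, as a list of (logical name, possible names)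
def pvPatterns : List (String × List String) :=
  [("date", ["date", "transaction_date", "posting_date", "value_date", "trans_date"]),
   ("description", ["description", "narrative", "details", "memo"]),
   ("amount", ["amount", "value", "transaction_amount", "debit_amount", "credit_amount"]),
   ("reference", ["reference", "ref", "transaction_ref", "doc_number", "cheque_ref"])]

def pvA_inner (logical pattern : String) (cols : List String)
    (enumLower : List (Int × String)) (m : PySem.Dict String String) : PySem.Dict String String :=
  match enumLower with
  | [] => m
  | (i, col) :: rest =>
      if PySem.Str.isIn pattern col then
        match PySem.List.pyGet? cols i with
        | some orig => m.insert logical orig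
        | none => m
      else pvA_inner logical pattern cols rest m

def pvA_patLoop (logical : String) (pats : List String) (cols lower : List String)
    (m : PySem.Dict String String) : PySem.Dict String String :=
  match pats with
  | [] => m
  | p :: ps =>
      let m' := pvA_inner logical p cols (PySem.List.enumerate lower 0) m
      if m'.contains logical then m' else pvA_patLoop logical ps cols lower m'

def pvB_rankAux (names : List String) (low : String) (j : Nat) : Option Nat :=
  match names with
  | [] => none
  | n :: rest => if PySem.Str.isIn n low then some j else pvB_rankAux rest low (j + 1)

def pvB_rank (names : List String) (low : String) : Option Nat :=
  pvB_rankAux names low 0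

def pvB_step (names : List String) (best : Option (Nat × String)) (col : String) : Option (Nat × String) :=
  match pvB_rank names (PySem.Str.lower col) with
  | none => best
  | some r =>
      match best with
      | none => some (r, col)
      | some (r0, c0) => if r < r0 then some (r, col) else some (r0, c0)

def pvB_best (names : List String) (columns : List String) : Option String :=
  (columns.foldl (pvB_step names) none).map (·.2)

def create_column_mapping_py (available_columns : List String) : List (String × String) :=
  let available_lower := available_columns.map PySem.Str.lower
  (pvPatterns.foldl
    (fun m kv => pvA_patLoop kv.1 kv.2 available_columns available_lower m)
    (PySem.Dict.empty : PySem.Dict String String)).items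

def create_column_mapping_py_alt (available_columns : List String) : List (String × String) :=
  (pvPatterns.foldl
    (fun m kv =>
      match pvB_best kv.2 available_columns with
      | some c => m.insert kv.1 c
      | none => m)
    (PySem.Dict.empty : PySem.Dict String String)).items

-- ===== PRECONDITION & SPEC =====
def Spec_create_column_mapping_py (available_columns : List String) (out : List (String × String)) : Prop := out = create_column_mapping_py_alt available_columns
instance (available_columns : List String) (out : List (String × String)) : Decidable (Spec_create_column_mapping_py available_columns out) := by unfold Spec_create_column_mapping_py; infer_instance

-- ===== CLAIM (what is proved, stated in full; the proofs are below) =====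
def Claim_equal_create_column_mapping_py : Prop := ∀ (available_columns : List String), Dom_create_column_mapping_py available_columns → Spec_create_column_mapping_py available_columns (create_column_mapping_py available_columns)

-- ===== LEMMAS AND PROOFS =====

-- A's per-logical-name value: the first pattern having a containing column, then the first such column
def pvAfind (pats cols : List String) : Option String :=
  pats.findSome? (fun p => cols.find? (fun c => PySem.Str.isIn p (PySem.Str.lower c)))

lemma pvA_inner_eq (logical p : String) (cols : List String) (k : Nat) (m : PySem.Dict String String) :
    pvA_inner logical p cols (PySem.List.enumerate ((cols.drop k).map PySem.Str.lower) (k : Int)) m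
      = match (cols.drop k).find? (fun c => PySem.Str.isIn p (PySem.Str.lower c)) with
        | some c => m.insert logical c
        | none => m := by
  induction h : cols.drop k generalizing k with
  | nil => simp [pvA_inner]
  | cons c rest ih =>
    have hget : cols[k]? = some c := by rw [← List.head?_drop, h]; rfl
    have htail : cols.drop (k+1) = rest := by rw [← List.tail_drop, h]; rfl
    simp only [List.map_cons, PySem.List.enumerate_cons, pvA_inner, List.find?_cons]
    by_cases hc : PySem.Str.isIn p (PySem.Str.lower c) = true
    · rw [hc, if_pos rfl]
      simp [PySem.List.pyGet?_natCast, hget]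
    · simp only [Bool.not_eq_true] at hc
      rw [hc, if_neg (by simp)]
      have hcast : ((k : Int) + 1) = ((k + 1 : Nat) : Int) := by push_cast; ring
      rw [hcast, ih (k+1) htail]

lemma pvA_patLoop_eq (logical : String) (pats cols : List String) (m : PySem.Dict String String)
    (hm : m.contains logical = false) :
    pvA_patLoop logical pats cols (cols.map PySem.Str.lower) m
      = match pvAfind pats cols with
        | some c => m.insert logical c
        | none => m := by
  induction pats generalizing m with
  | nil => simp [pvA_patLoop, pvAfind]
  | cons p ps ih =>
    have h0 := pvA_inner_eq logical p cols 0 m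
    simp only [List.drop_zero, Nat.cast_zero] at h0
    rw [pvA_patLoop, pvAfind, List.findSome?_cons]
    rw [h0]
    cases hfind : cols.find? (fun c => PySem.Str.isIn p (PySem.Str.lower c)) with
    | some c =>
      simp [PySem.Dict.contains_insert_self]
    | none =>
      have : PySem.Dict.contains m logical = false := hm
      rw [if_neg (by simp [this])]
      rw [ih m hm, pvAfind]

lemma pvB_rankAux_shift (names : List String) (low : String) (j : Nat) :
    pvB_rankAux names low j = (pvB_rankAux names low 0).map (· + j) := by
  induction names generalizing j with
  | nil => simp [pvB_rankAux]
  | cons n rest ih =>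
    simp only [pvB_rankAux]
    by_cases h : PySem.Chars.isIn n.toList low.toList = true
    · simp [h]
    · simp only [Bool.not_eq_true] at h
      simp only [PySem.Str.isIn_eq, h, Bool.false_eq_true, if_false]
      rw [ih (j+1), ih 1, Option.map_map]
      congr 1
      funext x
      simp; omega

lemma pvB_rank_cons (n : String) (rest : List String) (low : String) :
    pvB_rank (n :: rest) low
      = if PySem.Str.isIn n low then some 0 else (pvB_rank rest low).map (· + 1) := by
  rw [pvB_rank, pvB_rankAux, pvB_rankAux_shift]
  rfl

lemma pvB_keep_zero (names : List String) (c : String) (suf : List String) :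
    suf.foldl (pvB_step names) (some (0, c)) = some (0, c) := by
  induction suf with
  | nil => rfl
  | cons x xs ih =>
    rw [List.foldl_cons]
    have : pvB_step names (some (0, c)) x = some (0, c) := by
      rw [pvB_step]
      cases pvB_rank names (PySem.Str.lower x) <;> simp
    rw [this, ih]

lemma pvB_fold_inv (names : List String) (pre : List String) (b : Option (Nat × String)) :
    pre.foldl (pvB_step names) b = b
      ∨ ∃ r c, c ∈ pre ∧ pvB_rank names (PySem.Str.lower c) = some r
          ∧ pre.foldl (pvB_step names) b = some (r, c) := by
  induction pre generalizing b with
  | nil => left; rfl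
  | cons x xs ih =>
    rw [List.foldl_cons]
    rcases hr : pvB_rank names (PySem.Str.lower x) with _ | r
    · have hs : pvB_step names b x = b := by rw [pvB_step, hr]
      rw [hs]
      rcases ih b with h | ⟨r, c, hc, hrk, hfd⟩
      · left; exact h
      · right; exact ⟨r, c, List.mem_cons_of_mem _ hc, hrk, hfd⟩
    · rcases b with _ | ⟨r0, c0⟩
      · have hs2 : pvB_step names none x = some (r, x) := by rw [pvB_step, hr]
        rw [hs2]
        rcases ih (some (r, x)) with h | ⟨r', c', hc', hrk', hfd'⟩
        · right; exact ⟨r, x, List.mem_cons_self, hr, h⟩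
        · right; exact ⟨r', c', List.mem_cons_of_mem _ hc', hrk', hfd'⟩
      · by_cases hlt : r < r0
        · have hs2 : pvB_step names (some (r0, c0)) x = some (r, x) := by
            rw [pvB_step, hr]; simp [hlt]
          rw [hs2]
          rcases ih (some (r, x)) with h | ⟨r', c', hc', hrk', hfd'⟩
          · right; exact ⟨r, x, List.mem_cons_self, hr, h⟩
          · right; exact ⟨r', c', List.mem_cons_of_mem _ hc', hrk', hfd'⟩
        · have hs2 : pvB_step names (some (r0, c0)) x = some (r0, c0) := by
            rw [pvB_step, hr]; simp [hlt]
          rw [hs2]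
          rcases ih (some (r0, c0)) with h | ⟨r', c', hc', hrk', hfd'⟩
          · left; exact h
          · right; exact ⟨r', c', List.mem_cons_of_mem _ hc', hrk', hfd'⟩

lemma pvB_fold_shift (names1 names2 : List String) (cols : List String)
    (hf : ∀ c ∈ cols, pvB_rank names1 (PySem.Str.lower c)
            = (pvB_rank names2 (PySem.Str.lower c)).map (· + 1)) (b : Option (Nat × String)) :
    cols.foldl (pvB_step names1) (b.map (fun rc => (rc.1 + 1, rc.2)))
      = (cols.foldl (pvB_step names2) b).map (fun rc => (rc.1 + 1, rc.2)) := by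
  induction cols generalizing b with
  | nil => rfl
  | cons x xs ih =>
    rw [List.foldl_cons, List.foldl_cons]
    have hx := hf x List.mem_cons_self
    have hstep : pvB_step names1 (b.map (fun rc => (rc.1 + 1, rc.2))) x
        = (pvB_step names2 b x).map (fun rc => (rc.1 + 1, rc.2)) := by
      rw [pvB_step, pvB_step, hx]
      rcases pvB_rank names2 (PySem.Str.lower x) with _ | r
      · rfl
      · rcases b with _ | ⟨r0, c0⟩
        · rfl
        · simp only [Option.map_some]
          by_cases hlt : r < r0
          · simp [hlt]
          · simp [hlt]
    rw [hstep, ih (fun c hc => hf c (List.mem_cons_of_mem _ hc))]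

lemma pvB_fold_nil (cols : List String) (b : Option (Nat × String)) :
    cols.foldl (pvB_step []) b = b := by
  induction cols generalizing b with
  | nil => rfl
  | cons x xs ih => rw [List.foldl_cons]; exact ih _

lemma pvB_best_eq (pats cols : List String) : pvB_best pats cols = pvAfind pats cols := by
  induction pats generalizing cols with
  | nil => simp [pvB_best, pvB_fold_nil, pvAfind]
  | cons p ps ih =>
    rcases hfind : cols.find? (fun c => PySem.Str.isIn p (PySem.Str.lower c)) with _ | c0
    · -- no column matches p: ranks all shift by one
      have hnone : ∀ c ∈ cols, PySem.Str.isIn p (PySem.Str.lower c) = false := by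
        intro c hc
        have := List.find?_eq_none.mp hfind c hc
        simpa using this
      have hf : ∀ c ∈ cols, pvB_rank (p :: ps) (PySem.Str.lower c)
          = (pvB_rank ps (PySem.Str.lower c)).map (· + 1) := by
        intro c hc
        rw [pvB_rank_cons, hnone c hc]
        simp
      have hshift := pvB_fold_shift (p :: ps) ps cols hf none
      simp only [Option.map_none] at hshift
      rw [pvB_best, hshift]
      rw [pvAfind, List.findSome?_cons, hfind]
      rw [← pvAfind, ← ih cols, pvB_best, Option.map_map]
      rfl
    · -- c0 is the first column containing p
      obtain ⟨hpc0, pre, suf, hcols, hpre⟩ := List.find?_eq_some_iff_append.mp hfind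
      have hpre' : ∀ a ∈ pre, PySem.Str.isIn p (PySem.Str.lower a) = false := by
        intro a ha
        have := hpre a ha
        simpa using this
      have hrank0 : pvB_rank (p :: ps) (PySem.Str.lower c0) = some 0 := by
        rw [pvB_rank_cons, hpc0]; rfl
      rw [pvB_best, hcols, List.foldl_append, List.foldl_cons]
      have hb := pvB_fold_inv (p :: ps) pre none
      have hstep : pvB_step (p :: ps) (pre.foldl (pvB_step (p :: ps)) none) c0 = some (0, c0) := by
        rcases hb with h | ⟨r, c, hc, hrk, hfd⟩
        · rw [h, pvB_step, hrank0]
        · rw [hfd, pvB_step, hrank0]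
          have : 0 < r := by
            rw [pvB_rank_cons, hpre' c hc] at hrk
            simp only [Bool.false_eq_true, if_false, Option.map_eq_some_iff] at hrk
            obtain ⟨a, -, h2⟩ := hrk
            omega
          simp [this]
      rw [hstep, pvB_keep_zero]
      rw [pvAfind, List.findSome?_cons, ← hcols, hfind]
      rfl

lemma pv_fold_eq (cols : List String) (pl : List (String × List String)) (m : PySem.Dict String String)
    (hfresh : ∀ kv ∈ pl, m.contains kv.1 = false) (hnodup : (pl.map (·.1)).Nodup) :
    pl.foldl (fun m kv => pvA_patLoop kv.1 kv.2 cols (cols.map PySem.Str.lower) m) m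
      = pl.foldl (fun m kv =>
          match pvB_best kv.2 cols with
          | some c => m.insert kv.1 c
          | none => m) m := by
  induction pl generalizing m with
  | nil => rfl
  | cons kv rest ih =>
    rw [List.foldl_cons, List.foldl_cons]
    have hm := hfresh kv List.mem_cons_self
    rw [pvA_patLoop_eq kv.1 kv.2 cols m hm, ← pvB_best_eq]
    have hne : ∀ kv' ∈ rest, kv'.1 ≠ kv.1 := by
      simp only [List.map_cons, List.nodup_cons, List.mem_map] at hnodup
      intro kv' h' heq
      exact hnodup.1 ⟨kv', h', heq⟩
    have hnodup' : (rest.map (·.1)).Nodup := by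
      simp only [List.map_cons, List.nodup_cons] at hnodup
      exact hnodup.2
    rcases hbest : pvB_best kv.2 cols with _ | c
    · exact ih m (fun kv' h' => hfresh kv' (List.mem_cons_of_mem _ h')) hnodup'
    · exact ih _ (fun kv' h' => by
        rw [PySem.Dict.contains_insert]
        simp [hne kv' h', hfresh kv' (List.mem_cons_of_mem _ h')]) hnodup'

theorem pv_main (cols : List String) :
    create_column_mapping_py cols = create_column_mapping_py_alt cols := by
  rw [create_column_mapping_py, create_column_mapping_py_alt]
  rw [pv_fold_eq cols pvPatterns PySem.Dict.empty
      (fun kv _ => PySem.Dict.contains_empty kv.1) (by decide)]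

-- ===== VERDICT (by name: the statement is the Claim_ definition above) =====
theorem create_column_mapping_py_spec : Claim_equal_create_column_mapping_py := by
  intro cols _
  unfold Spec_create_column_mapping_py
  exact pv_main cols
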